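-- pv_equiv track=rewrite | github.com/kendraio/kendraio-gists | tracelockflow/proxy.py | slug_from_hostname
-- ===== SOURCE A (Python) =====
-- JUNK_LABELS = {"mcp", "api", "www"}
--
-- def slug_from_hostname(host: str) -> str:
--     all_labels = [l for l in host.split(".") if l]
--     labels = [l for l in all_labels if l.lower() not in JUNK_LABELS] or all_labels
--     if not labels:
--         return "server"
--     slug = "-".join(labels).lower()
--     slug = "".join(ch if (ch.isalnum() or ch == "-") else "-" for ch in slug).strip("-")
--     while "--" in slug:
--         slug = slug.replace("--", "-")
--     return slug or "server"
-- ===== SOURCE B (Python) =====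
-- JUNK_LABELS = {"mcp", "api", "www"}
--
-- def slug_from_hostname(host: str) -> str:
--     all_labels = [l for l in host.split(".") if l]
--     labels = [l for l in all_labels if l.lower() not in JUNK_LABELS] or all_labels
--     out = []
--     pending = False
--     for ch in "-".join(labels).lower():
--         if ch.isalnum():
--             if pending and out:
--                 out.append("-")
--             out.append(ch)
--             pending = False
--         else:
--             pending = True
--     return "".join(out) or "server"
-- ===== Notes on version B (the rewrite author's own statement) =====
-- stated objective: simpler
-- what changed: A's three-stage normalization (per-char map to dashes, repeated double-dash collapse loop, stripping edge dashes) is replaced by one single pass over the lowered joined labels with a pending-separator flag that emits a dash only between alphanumeric runs.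
import Mathlib
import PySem

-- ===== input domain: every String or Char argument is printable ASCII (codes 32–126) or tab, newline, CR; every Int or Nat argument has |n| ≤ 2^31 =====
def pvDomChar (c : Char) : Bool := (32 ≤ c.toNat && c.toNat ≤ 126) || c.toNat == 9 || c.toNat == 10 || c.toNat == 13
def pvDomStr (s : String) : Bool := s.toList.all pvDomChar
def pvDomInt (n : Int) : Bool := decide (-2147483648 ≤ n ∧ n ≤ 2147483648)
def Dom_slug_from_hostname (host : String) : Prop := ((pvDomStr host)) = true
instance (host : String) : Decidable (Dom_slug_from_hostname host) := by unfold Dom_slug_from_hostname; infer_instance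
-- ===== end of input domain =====

-- B replaces A's three-stage slug normalization (per-char dash map, edge-dash strip, repeated double-dash collapse loop)
-- by one single pass over the lowered joined labels with a pending-separator flag. Objective: simpler.


-- ===== PORT A =====
-- JUNK_LABELS = {"mcp", "api", "www"}
def junkLabels : List (List Char) := [['m','c','p'], ['a','p','i'], ['w','w','w']]

-- 'all_labels = [l for l in host.split(".") if l]; labels = [... not in JUNK_LABELS] or all_labels'
-- (shared by both ports, exactly as in both Pythons)
def selectLabels (h : List Char) : List (List Char) :=
  let all_labels := (PySem.Chars.splitOn h ['.']).filter (fun l => decide (l ≠ []))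
  let kept := all_labels.filter (fun l => decide (PySem.Chars.lower l ∉ junkLabels))
  if kept = [] then all_labels else kept

-- the per-char map 'ch if (ch.isalnum() or ch == "-") else "-"' of A's join
def mapDash (ch : Char) : Char := if PySem.Chars.isalnum ch || ch == '-' then ch else '-'

-- The lemmas below exist only to justify termination of A's while-replace collapse loop
-- (each replace strictly shortens the string while a double dash occurs); pv_replace_dd_length_lt
-- is cited by collapseLoop's decreasing_by.
def repDD : List Char → List Char
  | [] => []
  | [c] => [c]
  | a :: b :: t => if a = '-' ∧ b = '-' then '-' :: repDD t else a :: repDD (b :: t)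

def hasDD : List Char → Bool
  | a :: b :: t => (decide (a = '-') && decide (b = '-')) || hasDD (b :: t)
  | _ => false

theorem go_eq_repDD : ∀ (fuel : Nat) (l acc : List Char), l.length ≤ fuel →
    PySem.Chars.replace.go ['-','-'] ['-'] fuel l acc = acc.reverse ++ repDD l := by
  intro fuel
  induction fuel with
  | zero =>
    intro l acc h
    have : l = [] := by cases l <;> simp_all
    subst this
    simp [PySem.Chars.replace.go, repDD]
  | succ n ih =>
    intro l acc h
    match l with
    | [] => simp [PySem.Chars.replace.go, repDD]
    | [c] =>
      have hpre : (['-','-'] : List Char).isPrefixOf [c] = false := by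
        simp [List.isPrefixOf]
      simp [PySem.Chars.replace.go, hpre, repDD]
      rw [ih [] (c :: acc) (by simp)]
      simp [repDD]
    | a :: b :: t =>
      by_cases hd : a = '-' ∧ b = '-'
      · obtain ⟨ha, hb⟩ := hd
        subst ha hb
        have hpre : (['-','-'] : List Char).isPrefixOf ('-' :: '-' :: t) = true := by
          simp [List.isPrefixOf]
        simp only [PySem.Chars.replace.go, hpre, if_true, List.length_cons, List.drop_succ_cons,
          List.length_nil, List.drop_zero]
        rw [ih t (['-'].reverse ++ acc) (by simp at h ⊢; omega)]
        simp [repDD]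
      · have hpre : (['-','-'] : List Char).isPrefixOf (a :: b :: t) = false := by
          by_cases ha : a = '-'
          · have hb : b ≠ '-' := fun hb => hd ⟨ha, hb⟩
            simp only [List.isPrefixOf, Bool.and_eq_false_iff, beq_eq_false_iff_ne, ne_eq]
            exact Or.inr (Or.inl fun hb' => hb hb'.symm)
          · simp only [List.isPrefixOf, Bool.and_eq_false_iff, beq_eq_false_iff_ne, ne_eq]
            exact Or.inl fun ha' => ha ha'.symm
        simp only [PySem.Chars.replace.go, hpre, Bool.false_eq_true, if_false]
        rw [ih (b :: t) (a :: acc) (by simp at h ⊢; omega)]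
        simp [repDD, hd]

theorem replace_dd_eq_repDD (s : List Char) :
    PySem.Chars.replace s ['-','-'] ['-'] = repDD s := by
  rw [PySem.Chars.replace]
  simp
  rw [go_eq_repDD s.length s [] (le_refl _)]
  simp

theorem repDD_length_le (s : List Char) : (repDD s).length ≤ s.length := by
  induction s using repDD.induct with
  | case1 => simp [repDD]
  | case2 c => simp [repDD]
  | case3 a b t hd ih =>
    rw [repDD, if_pos hd]
    simp only [List.length_cons]
    omega
  | case4 a b t hd ih =>
    rw [repDD, if_neg hd]
    simp only [List.length_cons] at ih ⊢
    omega

theorem hasDD_cons_cons (a b : Char) (t : List Char) :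
    hasDD (a :: b :: t) = ((decide (a = '-') && decide (b = '-')) || hasDD (b :: t)) := rfl

theorem repDD_length_lt (s : List Char) (h : hasDD s = true) : (repDD s).length < s.length := by
  induction s using repDD.induct with
  | case1 => simp [hasDD] at h
  | case2 c => simp [hasDD] at h
  | case3 a b t hd ih =>
    have := repDD_length_le t
    rw [repDD, if_pos hd]
    simp only [List.length_cons]
    omega
  | case4 a b t hd ih =>
    have hdd : hasDD (b :: t) = true := by
      rw [hasDD_cons_cons] at h
      simp only [Bool.or_eq_true, Bool.and_eq_true, decide_eq_true_eq] at h
      rcases h with ⟨ha, hb⟩ | h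
      · exact absurd ⟨ha, hb⟩ hd
      · exact h
    have := ih hdd
    rw [repDD, if_neg hd]
    simp only [List.length_cons] at this ⊢
    omega

theorem hasDD_iff_infix (s : List Char) : hasDD s = true ↔ ['-','-'] <:+: s := by
  induction s with
  | nil =>
    constructor
    · intro h; simp [hasDD] at h
    · intro h; have := h.length_le; simp at this
  | cons c t ih =>
    rw [List.infix_cons_iff]
    cases t with
    | nil =>
      constructor
      · intro h; simp [hasDD] at h
      · rintro (h | h)
        · have := h.length_le; simp at this
        · have := h.length_le; simp at this
    | cons b u =>
      rw [hasDD_cons_cons]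
      simp only [Bool.or_eq_true, Bool.and_eq_true, decide_eq_true_eq]
      rw [ih]
      constructor
      · rintro (⟨hc, hb⟩ | h)
        · subst hc hb
          exact Or.inl ((List.cons_prefix_cons).2 ⟨rfl, (List.cons_prefix_cons).2 ⟨rfl, List.nil_prefix⟩⟩)
        · exact Or.inr h
      · rintro (h | h)
        · rw [List.cons_prefix_cons] at h
          obtain ⟨hc, h2⟩ := h
          rw [List.cons_prefix_cons] at h2
          exact Or.inl ⟨hc.symm, h2.1.symm⟩
        · exact Or.inr h

theorem isIn_dd_eq_hasDD (s : List Char) : PySem.Chars.isIn ['-','-'] s = hasDD s := by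
  by_cases h : hasDD s = true
  · rw [h, (PySem.Chars.isIn_iff_infix _ _).2 ((hasDD_iff_infix s).1 h)]
  · have h' : hasDD s = false := by simpa using h
    rw [h']
    rw [PySem.Chars.isIn_eq_false_iff]
    rw [← hasDD_iff_infix, h']
    simp

theorem pv_replace_dd_length_lt (s : List Char) (h : PySem.Chars.isIn ['-','-'] s = true) :
    (PySem.Chars.replace s ['-','-'] ['-']).length < s.length := by
  rw [replace_dd_eq_repDD]
  exact repDD_length_lt s (by rw [← isIn_dd_eq_hasDD]; exact h)

def collapseLoop (s : List Char) : List Char :=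
  if h : PySem.Chars.isIn ['-','-'] s = true then
    collapseLoop (PySem.Chars.replace s ['-','-'] ['-'])
  else s
termination_by s.length
decreasing_by exact pv_replace_dd_length_lt s h

def slug_from_hostname (host : String) : String :=
  let labels := selectLabels host.toList
  if labels = [] then "server"
  else
    let slug := PySem.Chars.lower (PySem.Chars.join ['-'] labels)
    let slug := slug.map mapDash
    let slug := PySem.Chars.stripChars slug ['-']
    let slug := collapseLoop slug
    if slug = [] then "server" else String.ofList slug

-- ===== PORT B =====
-- one pass: 'if ch.isalnum(): (emit "-" if pending and out) ; out.append(ch) else: pending = True'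
def bStep (st : List Char × Bool) (c : Char) : List Char × Bool :=
  if PySem.Chars.isalnum c then
    ((if st.2 ∧ st.1 ≠ [] then st.1 ++ ['-'] else st.1) ++ [c], false)
  else (st.1, true)
def slug_from_hostname_alt (host : String) : String :=
  let labels := selectLabels host.toList
  let out := ((PySem.Chars.lower (PySem.Chars.join ['-'] labels)).foldl bStep ([], false)).1
  if out = [] then "server" else String.ofList out

-- ===== PRECONDITION & SPEC =====
def Spec_slug_from_hostname (host : String) (out : String) : Prop := out = slug_from_hostname_alt host
instance (host : String) (out : String) : Decidable (Spec_slug_from_hostname host out) := by unfold Spec_slug_from_hostname; infer_instance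

-- ===== CLAIM (what is proved, stated in full; the proofs are below) =====
def Claim_equal_slug_from_hostname : Prop := ∀ (host : String), Dom_slug_from_hostname host → Spec_slug_from_hostname host (slug_from_hostname host)

-- ===== LEMMAS AND PROOFS =====
def squeeze : List Char → List Char
  | [] => []
  | c :: t => if c = '-' then '-' :: squeeze (t.dropWhile (fun x => x == '-')) else c :: squeeze t
termination_by l => l.length
decreasing_by
  · have := List.length_dropWhile_le (fun x => x == '-') t
    simp; omega
  · simp

theorem squeeze_nil : squeeze [] = [] := by rw [squeeze]

theorem squeeze_cons (c : Char) (t : List Char) :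
    squeeze (c :: t) =
      if c = '-' then '-' :: squeeze (t.dropWhile (fun x => x == '-')) else c :: squeeze t := by
  rw [squeeze]

theorem dw_pos (c : Char) (t : List Char) (h : c = '-') :
    List.dropWhile (fun x => x == '-') (c :: t) = t.dropWhile (fun x => x == '-') :=
  List.dropWhile_cons_of_pos (by simp [h])

theorem dw_neg (c : Char) (t : List Char) (h : ¬ c = '-') :
    List.dropWhile (fun x => x == '-') (c :: t) = c :: t :=
  List.dropWhile_cons_of_neg (by simp [h])

theorem dropWhile_dash_repDD (s : List Char) :
    (repDD s).dropWhile (fun x => x == '-') = repDD (s.dropWhile (fun x => x == '-')) := by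
  induction s using repDD.induct with
  | case1 => simp [repDD]
  | case2 c =>
    by_cases hc : c = '-'
    · rw [repDD, dw_pos c [] hc]; simp [repDD]
    · rw [repDD, dw_neg c [] hc]; simp [repDD]
  | case3 a b t hd ih =>
    rw [repDD, if_pos hd]
    rw [dw_pos '-' (repDD t) rfl]
    rw [dw_pos a (b :: t) hd.1, dw_pos b t hd.2]
    exact ih
  | case4 a b t hd ih =>
    by_cases ha : a = '-'
    · have hb : ¬ b = '-' := fun hb => hd ⟨ha, hb⟩
      rw [repDD, if_neg hd]
      rw [dw_pos a (repDD (b :: t)) ha]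
      rw [dw_pos a (b :: t) ha, dw_neg b t hb]
      rw [ih, dw_neg b t hb]
    · rw [repDD, if_neg hd]
      rw [dw_neg a (repDD (b :: t)) ha, dw_neg a (b :: t) ha]
      rw [repDD, if_neg hd]

theorem squeeze_repDD : ∀ (n : Nat) (s : List Char), s.length ≤ n → squeeze (repDD s) = squeeze s := by
  intro n
  induction n with
  | zero =>
    intro s h
    have : s = [] := by cases s <;> simp_all
    subst this; rfl
  | succ n ih =>
    intro s h
    match s with
    | [] => rfl
    | [c] => rfl
    | a :: b :: t =>
      simp only [List.length_cons] at h
      by_cases hd : a = '-' ∧ b = '-'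
      · rw [repDD, if_pos hd]
        conv_rhs => rw [squeeze_cons, if_pos hd.1, dw_pos b t hd.2]
        rw [squeeze_cons, if_pos rfl, dropWhile_dash_repDD]
        rw [ih _ (le_trans (List.length_dropWhile_le _ t) (by omega))]
      · rw [repDD, if_neg hd]
        by_cases ha : a = '-'
        · have hb : ¬ b = '-' := fun hb => hd ⟨ha, hb⟩
          conv_rhs => rw [squeeze_cons, if_pos ha, dw_neg b t hb]
          rw [squeeze_cons, if_pos ha, dropWhile_dash_repDD]
          rw [dw_neg b t hb, ih (b :: t) (by simp; omega)]
        · conv_rhs => rw [squeeze_cons, if_neg ha]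
          rw [squeeze_cons, if_neg ha, ih (b :: t) (by simp; omega)]

theorem noDD_squeeze (s : List Char) (h : hasDD s = false) : squeeze s = s := by
  induction s with
  | nil => exact squeeze_nil
  | cons c t ih =>
    by_cases hc : c = '-'
    · subst hc
      cases t with
      | nil => rw [squeeze_cons, if_pos rfl]; simp [squeeze_nil]
      | cons b u =>
        have hb : ¬ b = '-' := by
          intro hb; subst hb
          rw [hasDD_cons_cons] at h; simp at h
        have ht : hasDD (b :: u) = false := by
          rw [hasDD_cons_cons] at h
          simp only [Bool.or_eq_false_iff] at h
          exact h.2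
        rw [squeeze_cons, if_pos rfl, dw_neg b u hb, ih ht]
    · have ht : hasDD t = false := by
        cases t with
        | nil => rfl
        | cons b u =>
          rw [hasDD_cons_cons] at h
          simp only [Bool.or_eq_false_iff] at h
          exact h.2
      rw [squeeze_cons, if_neg hc, ih ht]

theorem collapseLoop_eq_squeeze (s : List Char) : collapseLoop s = squeeze s := by
  induction s using collapseLoop.induct with
  | case1 s h ih =>
    rw [collapseLoop, dif_pos h, ih, replace_dd_eq_repDD]
    exact squeeze_repDD s.length s (le_refl _)
  | case2 s h =>
    rw [collapseLoop, dif_neg h]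
    have : hasDD s = false := by
      rw [← isIn_dd_eq_hasDD]; simpa using h
    exact (noDD_squeeze s this).symm

def tailScan : Bool → List Char → List Char
  | _, [] => []
  | p, c :: t =>
    if PySem.Chars.isalnum c then (if p then ['-', c] else [c]) ++ tailScan false t
    else tailScan true t

def headScan : List Char → List Char
  | [] => []
  | c :: t => if PySem.Chars.isalnum c then c :: tailScan false t else headScan t

def rstripD (u : List Char) : List Char := (u.reverse.dropWhile (fun x => x == '-')).reverse

theorem rstripD_cons_neg (c : Char) (v : List Char) (h : ¬ c = '-') :
    rstripD (c :: v) = c :: rstripD v := by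
  unfold rstripD
  rw [List.reverse_cons, List.dropWhile_append]
  by_cases he : (v.reverse.dropWhile (fun x => x == '-')) = []
  · rw [he]; simp [dw_neg c [] h]
  · rw [if_neg (by simpa using he)]
    simp

theorem rstripD_cons_pos (v : List Char) :
    rstripD ('-' :: v) = if rstripD v = [] then [] else '-' :: rstripD v := by
  unfold rstripD
  rw [List.reverse_cons, List.dropWhile_append]
  by_cases he : (v.reverse.dropWhile (fun x => x == '-')) = []
  · rw [he]; simp [dw_pos '-' [] rfl]
  · rw [if_neg (by simpa using he), if_neg (by simpa using he)]
    simp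

theorem rstripD_nil : rstripD [] = [] := rfl

theorem commute_dw_rstripD (u : List Char) :
    (rstripD u).dropWhile (fun x => x == '-') = rstripD (u.dropWhile (fun x => x == '-')) := by
  induction u with
  | nil => rfl
  | cons c v ih =>
    by_cases hc : c = '-'
    · subst hc
      rw [rstripD_cons_pos, dw_pos '-' v rfl, ← ih]
      by_cases he : rstripD v = []
      · rw [if_pos he, he]
      · rw [if_neg he, dw_pos '-' (rstripD v) rfl]
    · rw [rstripD_cons_neg c v hc, dw_neg c v hc, dw_neg c (rstripD v) hc, rstripD_cons_neg c v hc]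

theorem isalnum_dash_false : PySem.Chars.isalnum '-' = false := by decide

theorem alnum_ne_dash {c : Char} (h : PySem.Chars.isalnum c = true) : ¬ c = '-' := by
  intro e; subst e; rw [isalnum_dash_false] at h; exact absurd h (by simp)

-- on the dash/alnum alphabet: rstripD u = [] iff u has no alnum char
theorem rstripD_eq_nil_iff (u : List Char)
    (had : ∀ c ∈ u, PySem.Chars.isalnum c = true ∨ c = '-') :
    rstripD u = [] ↔ u.any PySem.Chars.isalnum = false := by
  unfold rstripD
  rw [List.reverse_eq_nil_iff, List.dropWhile_eq_nil_iff]
  simp only [List.mem_reverse, List.any_eq_false, Bool.not_eq_true, beq_iff_eq]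
  constructor
  · intro h c hc
    rw [h c hc]; exact isalnum_dash_false
  · intro h c hc
    rcases had c hc with ha | ha
    · rw [h c hc] at ha; exact absurd ha (by simp)
    · exact ha

theorem scan_eq_squeeze (t : List Char)
    (had : ∀ c ∈ t, PySem.Chars.isalnum c = true ∨ c = '-') :
    tailScan false t = squeeze (rstripD t) ∧
    tailScan true t = (if t.any PySem.Chars.isalnum then
      '-' :: squeeze ((rstripD t).dropWhile (fun x => x == '-')) else []) := by
  induction t with
  | nil => simp [tailScan, rstripD_nil, squeeze_nil]
  | cons c u ih =>
    have hadu : ∀ x ∈ u, PySem.Chars.isalnum x = true ∨ x = '-' :=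
      fun x hx => had x (List.mem_cons_of_mem c hx)
    obtain ⟨ih1, ih2⟩ := ih hadu
    rcases had c (List.mem_cons_self) with ha | hc
    · have hnd : ¬ c = '-' := alnum_ne_dash ha
      constructor
      · rw [tailScan, if_pos ha, if_neg (by simp)]
        rw [rstripD_cons_neg c u hnd, squeeze_cons, if_neg hnd, ih1]
        rfl
      · rw [tailScan, if_pos ha, if_pos rfl]
        rw [if_pos (by simp [ha]), rstripD_cons_neg c u hnd, dw_neg c (rstripD u) hnd]
        rw [squeeze_cons, if_neg hnd, ih1]
        rfl
    · subst hc
      have hna : PySem.Chars.isalnum '-' = true → False := by rw [isalnum_dash_false]; simp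
      have hany : ('-' :: u).any PySem.Chars.isalnum = u.any PySem.Chars.isalnum := by
        simp [isalnum_dash_false]
      constructor
      · rw [tailScan, if_neg hna, ih2, rstripD_cons_pos]
        by_cases he : rstripD u = []
        · rw [if_pos he, ((rstripD_eq_nil_iff u hadu).1 he)]
          simp [squeeze_nil]
        · rw [if_neg he, squeeze_cons, if_pos rfl]
          have : u.any PySem.Chars.isalnum = true := by
            by_contra hx
            exact he ((rstripD_eq_nil_iff u hadu).2 (by simpa using hx))
          rw [if_pos this]
      · rw [tailScan, if_neg hna, ih2, hany, rstripD_cons_pos]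
        by_cases he : rstripD u = []
        · rw [if_pos he, ((rstripD_eq_nil_iff u hadu).1 he)]
          simp
        · have hu : u.any PySem.Chars.isalnum = true := by
            by_contra hx
            exact he ((rstripD_eq_nil_iff u hadu).2 (by simpa using hx))
          rw [if_neg he, if_pos hu, if_pos hu, dw_pos '-' (rstripD u) rfl]

theorem headScan_eq_squeeze (t : List Char)
    (had : ∀ c ∈ t, PySem.Chars.isalnum c = true ∨ c = '-') :
    headScan t = squeeze ((rstripD t).dropWhile (fun x => x == '-')) := by
  induction t with
  | nil => simp [headScan, rstripD_nil, squeeze_nil]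
  | cons c u ih =>
    have hadu : ∀ x ∈ u, PySem.Chars.isalnum x = true ∨ x = '-' :=
      fun x hx => had x (List.mem_cons_of_mem c hx)
    rcases had c (List.mem_cons_self) with ha | hc
    · have hnd : ¬ c = '-' := alnum_ne_dash ha
      rw [headScan, if_pos ha, (scan_eq_squeeze u hadu).1]
      rw [rstripD_cons_neg c u hnd, dw_neg c (rstripD u) hnd, squeeze_cons, if_neg hnd]
    · subst hc
      have hna : PySem.Chars.isalnum '-' = true → False := by rw [isalnum_dash_false]; simp
      rw [headScan, if_neg hna, ih hadu, rstripD_cons_pos]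
      by_cases he : rstripD u = []
      · rw [if_pos he, he]
      · rw [if_neg he, dw_pos '-' (rstripD u) rfl]

theorem foldl_bStep_ne_nil (t : List Char) (out : List Char) (p : Bool) (h : out ≠ []) :
    (t.foldl bStep (out, p)).1 = out ++ tailScan p t := by
  induction t generalizing out p with
  | nil => simp [tailScan]
  | cons c u ih =>
    rw [List.foldl_cons]
    by_cases ha : PySem.Chars.isalnum c = true
    · have : bStep (out, p) c = ((if p ∧ out ≠ [] then out ++ ['-'] else out) ++ [c], false) := by
        rw [bStep, if_pos ha]
      rw [this, ih _ _ (by simp), tailScan, if_pos ha]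
      by_cases hp : p = true
      · subst hp
        rw [if_pos ⟨rfl, h⟩, if_pos rfl]
        simp
      · have : p = false := by simpa using hp
        subst this
        rw [if_neg (by simp), if_neg (by simp)]
        simp
    · have : bStep (out, p) c = (out, true) := by
        rw [bStep, if_neg ha]
      rw [this, ih _ _ h, tailScan, if_neg ha]

theorem foldl_bStep_nil (t : List Char) (p : Bool) :
    (t.foldl bStep ([], p)).1 = headScan t := by
  induction t generalizing p with
  | nil => simp [headScan]
  | cons c u ih =>
    rw [List.foldl_cons]
    by_cases ha : PySem.Chars.isalnum c = true
    · have : bStep (([] : List Char), p) c = ([c], false) := by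
        rw [bStep, if_pos ha]; simp
      rw [this, foldl_bStep_ne_nil u [c] false (by simp), headScan, if_pos ha]
      rfl
    · have : bStep (([] : List Char), p) c = ([], true) := by
        rw [bStep, if_neg ha]
      rw [this, ih true, headScan, if_neg ha]

-- the per-char map of port A
theorem isalnum_mapDash (c : Char) : PySem.Chars.isalnum (mapDash c) = PySem.Chars.isalnum c := by
  unfold mapDash
  by_cases ha : PySem.Chars.isalnum c = true
  · rw [if_pos (by simp [ha])]
  · have ha' : PySem.Chars.isalnum c = false := by simpa using ha
    by_cases hd : c = '-'
    · rw [if_pos (by simp [hd])]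
    · rw [if_neg (by simp [ha', hd]), isalnum_dash_false, ha']

theorem AD_mapDash (s : List Char) :
    ∀ c ∈ s.map mapDash, PySem.Chars.isalnum c = true ∨ c = '-' := by
  intro c hc
  obtain ⟨x, _, rfl⟩ := List.mem_map.1 hc
  by_cases ha : PySem.Chars.isalnum x = true
  · left; rw [isalnum_mapDash]; exact ha
  · have ha' : PySem.Chars.isalnum x = false := by simpa using ha
    right
    unfold mapDash
    by_cases hd : x = '-'
    · rw [if_pos (by simp [hd])]; exact hd
    · rw [if_neg (by simp [ha', hd])]

theorem mapDash_alnum {c : Char} (ha : PySem.Chars.isalnum c = true) : mapDash c = c := by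
  unfold mapDash; rw [if_pos (by simp [ha])]

theorem mapDash_not_alnum {c : Char} (ha : PySem.Chars.isalnum c = false) : mapDash c = '-' := by
  unfold mapDash
  by_cases hd : c = '-'
  · rw [if_pos (by simp [hd])]; exact hd
  · rw [if_neg (by simp [ha, hd])]

theorem tailScan_map (s : List Char) (p : Bool) : tailScan p (s.map mapDash) = tailScan p s := by
  induction s generalizing p with
  | nil => rfl
  | cons c u ih =>
    by_cases ha : PySem.Chars.isalnum c = true
    · cases p <;> simp [tailScan, ha, ih, mapDash_alnum ha]
    · have ha' : PySem.Chars.isalnum c = false := by simpa using ha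
      cases p <;>
        simp [tailScan, ha', ih, mapDash_not_alnum ha', isalnum_dash_false]

theorem headScan_map (s : List Char) : headScan (s.map mapDash) = headScan s := by
  induction s with
  | nil => rfl
  | cons c u ih =>
    by_cases ha : PySem.Chars.isalnum c = true
    · simp [headScan, ha, tailScan_map, mapDash_alnum ha]
    · have ha' : PySem.Chars.isalnum c = false := by simpa using ha
      simp [headScan, ha', ih, mapDash_not_alnum ha', isalnum_dash_false]

theorem contains_dash_eq (c : Char) : (['-'] : List Char).contains c = (c == '-') := by
  simp only [List.contains_cons, List.contains_nil, Bool.or_false]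

theorem stripChars_dash (ds : List Char) :
    PySem.Chars.stripChars ds ['-'] = (rstripD ds).dropWhile (fun x => x == '-') := by
  rw [PySem.Chars.stripChars]
  have hp : (fun c => (['-'] : List Char).contains c) = (fun x => x == '-') := by
    funext c; exact contains_dash_eq c
  rw [hp, commute_dw_rstripD]
  rfl

theorem A_pipeline_eq_scan (s : List Char) :
    collapseLoop (PySem.Chars.stripChars (s.map mapDash) ['-']) =
      (s.foldl bStep ([], false)).1 := by
  rw [stripChars_dash, collapseLoop_eq_squeeze,
    ← headScan_eq_squeeze (s.map mapDash) (AD_mapDash s), headScan_map, foldl_bStep_nil]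

-- ===== VERDICT (by name: the statement is the Claim_ definition above) =====
theorem slug_from_hostname_spec : Claim_equal_slug_from_hostname := by
  intro host _
  unfold Spec_slug_from_hostname slug_from_hostname slug_from_hostname_alt
  by_cases h : selectLabels host.toList = []
  · simp only [h, if_pos]
    have : PySem.Chars.lower (PySem.Chars.join ['-'] ([] : List (List Char))) = [] := by rfl
    rw [this]
    rfl
  · simp only [if_neg h]
    rw [A_pipeline_eq_scan]
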